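-- pv_equiv track=rewrite | github.com/hage9998/etl_pipeline | transform.py | formatPriceMajor
-- ===== SOURCE A (Python) =====
-- def formatPriceMajor(Price):
--     majorPrice = '0'
--     start = 0
--     for i in range(len(Price)):
--         if Price[i] == ' ':
--             majorPrice = ''
--             start = 1
--         elif start == 1 and Price[i].isdigit():
--             majorPrice = majorPrice  + Price[i]
--         else:
--             continue
--     return majorPrice
-- ===== SOURCE B (Python) =====
-- def formatPriceMajor(Price):
--     if ' ' not in Price:
--         return '0'
--     tail = Price.rsplit(' ', 1)[1]
--     return ''.join(c for c in tail if c.isdigit())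
-- ===== Notes on version B (the rewrite author's own statement) =====
-- stated objective: simpler
-- what changed: Replaces A's single stateful pass with a reset-at-every-space accumulator and start flag by a three-step decomposition: guard on space membership, take the substring after the last space via rsplit, then filter its digits.
import Mathlib
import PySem

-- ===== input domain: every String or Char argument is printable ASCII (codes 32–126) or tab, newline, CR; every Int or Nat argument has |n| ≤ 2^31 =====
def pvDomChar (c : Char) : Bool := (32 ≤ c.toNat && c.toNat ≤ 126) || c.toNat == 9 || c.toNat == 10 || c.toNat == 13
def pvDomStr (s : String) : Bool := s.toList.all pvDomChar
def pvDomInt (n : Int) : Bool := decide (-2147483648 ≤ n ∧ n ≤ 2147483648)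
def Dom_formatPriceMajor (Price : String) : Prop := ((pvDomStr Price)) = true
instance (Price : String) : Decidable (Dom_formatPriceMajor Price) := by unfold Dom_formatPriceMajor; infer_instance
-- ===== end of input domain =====

-- B replaces A's single stateful pass (accumulator reset at every space) by: guard for a space,
-- take the segment after the last space, filter its digits — a simpler decomposition, same cost.

-- ===== PORT A =====
-- one step of A's for-loop: state = (majorPrice, start)
def pvStepA (st : String × Int) (c : Char) : String × Int :=
  if c = ' ' then ("", 1)
  else if st.2 = 1 ∧ PySem.Chars.isdigit c then (st.1.push c, st.2)
  else st

def formatPriceMajor (Price : String) : String :=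
  (Price.toList.foldl pvStepA ("0", 0)).1

-- ===== PORT B =====
-- hand-port of Price.rsplit(' ', 1)[1] (exact when ' ' ∈ cs): the segment after the last space
def pvTail (cs : List Char) : List Char := (cs.reverse.takeWhile (fun c => decide (c ≠ ' '))).reverse

def formatPriceMajor_alt (Price : String) : String :=
  if ' ' ∈ Price.toList then
    String.ofList ((pvTail Price.toList).filter (fun c => PySem.Chars.isdigit c))
  else "0"

-- ===== PRECONDITION & SPEC =====
def Spec_formatPriceMajor (Price : String) (out : String) : Prop := out = formatPriceMajor_alt Price
instance (Price : String) (out : String) : Decidable (Spec_formatPriceMajor Price out) := by unfold Spec_formatPriceMajor; infer_instance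

-- ===== CLAIM (what is proved, stated in full; the proofs are below) =====
def Claim_equal_formatPriceMajor : Prop := ∀ (Price : String), Dom_formatPriceMajor Price → Spec_formatPriceMajor Price (formatPriceMajor Price)

-- ===== LEMMAS AND PROOFS =====

theorem pvStrExt (s t : String) (h : s.toList = t.toList) : s = t := by
  have := congrArg String.ofList h; simpa using this

theorem pvTW_not_full (l : List Char) (h : ' ' ∈ l) :
    ¬ (l.takeWhile (fun c => decide (c ≠ ' '))).length = l.length := by
  intro hlen
  have heq := (List.takeWhile_prefix (l := l) (fun c => decide (c ≠ ' '))).eq_of_length hlen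
  have := List.takeWhile_eq_self_iff.mp heq ' ' h
  simp at this

theorem pvTW_full (l : List Char) (h : ' ' ∉ l) :
    l.takeWhile (fun c => decide (c ≠ ' ')) = l := by
  apply List.takeWhile_eq_self_iff.mpr
  intro x hx
  simp only [decide_eq_true_eq]
  intro hxe
  exact h (hxe ▸ hx)

theorem pvTail_cons_of_mem (c : Char) (cs : List Char) (h : ' ' ∈ cs) :
    pvTail (c :: cs) = pvTail cs := by
  unfold pvTail
  rw [List.reverse_cons, List.takeWhile_append,
    if_neg (pvTW_not_full cs.reverse (List.mem_reverse.mpr h))]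

theorem pvTail_space_of_not_mem (cs : List Char) (h : ' ' ∉ cs) :
    pvTail (' ' :: cs) = cs := by
  unfold pvTail
  have hfull := pvTW_full cs.reverse (fun hx => h (List.mem_reverse.mp hx))
  rw [List.reverse_cons, List.takeWhile_append, if_pos (congrArg List.length hfull)]
  have h1 : List.takeWhile (fun c => decide (c ≠ ' ')) [' '] = [] := by simp
  rw [h1]
  simp

-- A's loop after the first space has been seen (start = 1)
theorem pvLoop1 (cs : List Char) (s : String) :
    cs.foldl pvStepA (s, 1) =
      (if ' ' ∈ cs then String.ofList ((pvTail cs).filter (fun c => PySem.Chars.isdigit c))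
       else s ++ String.ofList (cs.filter (fun c => PySem.Chars.isdigit c)), 1) := by
  induction cs generalizing s with
  | nil =>
    simp only [List.foldl_nil, List.not_mem_nil, if_false, List.filter_nil]
    exact Prod.ext (pvStrExt s (s ++ String.ofList []) (by simp)) rfl
  | cons c rest ih =>
    by_cases hc : c = ' '
    · subst hc
      simp only [List.foldl_cons, pvStepA, if_true]
      rw [ih ""]
      by_cases hm : ' ' ∈ rest
      · simp [hm, pvTail_cons_of_mem _ _ hm]
      · rw [if_neg hm, if_pos (by simp : (' ' : Char) ∈ ' ' :: rest),
          pvTail_space_of_not_mem rest hm]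
        exact Prod.ext (pvStrExt _ _ (by simp)) rfl
    · simp only [List.foldl_cons, pvStepA, if_neg hc]
      by_cases hd : PySem.Chars.isdigit c = true
      · rw [if_pos ⟨trivial, hd⟩, ih (s.push c)]
        by_cases hm : ' ' ∈ rest
        · have hmc : ' ' ∈ c :: rest := List.mem_cons_of_mem _ hm
          simp [hm, hmc, pvTail_cons_of_mem _ _ hm]
        · have hmc : ' ' ∉ c :: rest := by
            intro h; rcases List.mem_cons.mp h with h | h
            · exact hc h.symm
            · exact hm h
          simp only [if_neg hm, if_neg hmc]
          congr 1
          apply pvStrExt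
          simp [String.toList_push, hd]
      · rw [if_neg (fun h => hd h.2), ih s]
        by_cases hm : ' ' ∈ rest
        · have hmc : ' ' ∈ c :: rest := List.mem_cons_of_mem _ hm
          simp [hm, hmc, pvTail_cons_of_mem _ _ hm]
        · have hmc : ' ' ∉ c :: rest := by
            intro h; rcases List.mem_cons.mp h with h | h
            · exact hc h.symm
            · exact hm h
          simp [hm, hmc, hd]

-- A's loop before any space (start = 0): the state is untouched until a space arrives
theorem pvLoop0 (cs : List Char) :
    (cs.foldl pvStepA ("0", 0)).1 =
      if ' ' ∈ cs then String.ofList ((pvTail cs).filter (fun c => PySem.Chars.isdigit c))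
      else "0" := by
  induction cs with
  | nil => simp
  | cons c rest ih =>
    by_cases hc : c = ' '
    · subst hc
      simp only [List.foldl_cons, pvStepA, if_true]
      rw [pvLoop1 rest ""]
      by_cases hm : ' ' ∈ rest
      · simp [hm, pvTail_cons_of_mem _ _ hm]
      · rw [if_neg hm, if_pos (by simp : (' ' : Char) ∈ ' ' :: rest),
          pvTail_space_of_not_mem rest hm]
        exact pvStrExt _ _ (by simp)
    · have hstep : pvStepA ("0", 0) c = ("0", 0) := by
        simp [pvStepA, hc]
      simp only [List.foldl_cons, hstep]
      rw [ih]
      by_cases hm : ' ' ∈ rest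
      · have hmc : ' ' ∈ c :: rest := List.mem_cons_of_mem _ hm
        simp [hm, hmc, pvTail_cons_of_mem _ _ hm]
      · have hmc : ' ' ∉ c :: rest := by
          intro h; rcases List.mem_cons.mp h with h | h
          · exact hc h.symm
          · exact hm h
        simp [hm, hmc]

-- ===== VERDICT (by name: the statement is the Claim_ definition above) =====
theorem formatPriceMajor_spec : Claim_equal_formatPriceMajor := by
  intro Price _
  unfold Spec_formatPriceMajor formatPriceMajor formatPriceMajor_alt
  rw [pvLoop0]
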